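-- pv_equiv track=rewrite | github.com/Dlairay/BrightgenGeneticsSDS | backend/app/core/utils.py | validate_image_type
-- ===== SOURCE A (Python) =====
-- from typing import Optional, Tuple
--
-- def validate_image_type(image_type: Optional[str]) -> str:
--     """
--     Validate and normalize image MIME type.
--
--     Args:
--         image_type: Input MIME type
--
--     Returns:
--         Valid MIME type
--     """
--     valid_types = {
--         'image/jpeg': ['image/jpeg', 'jpeg', 'jpg'],
--         'image/png': ['image/png', 'png'],
--         'image/gif': ['image/gif', 'gif'],
--         'image/webp': ['image/webp', 'webp']
--     }
--
--     if not image_type: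
--         return 'image/jpeg'
--
--     image_type_lower = image_type.lower()
--
--     for mime_type, aliases in valid_types.items():
--         if image_type_lower in aliases:
--             return mime_type
--
--     # Default to JPEG for unknown types
--     return 'image/jpeg'
-- ===== SOURCE B (Python) =====
-- _CANONICAL = {
--     'image/jpeg': 'image/jpeg', 'jpeg': 'image/jpeg', 'jpg': 'image/jpeg',
--     'image/png': 'image/png', 'png': 'image/png',
--     'image/gif': 'image/gif', 'gif': 'image/gif',
--     'image/webp': 'image/webp', 'webp': 'image/webp',
-- }
--
-- def validate_image_type(image_type):
--     if not image_type:
--         return 'image/jpeg'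
--     return _CANONICAL.get(image_type.lower(), 'image/jpeg')
-- ===== Notes on version B (the rewrite author's own statement) =====
-- stated objective: simpler
-- what changed: Replaces the loop over the canonical->aliases dict with list membership tests by a single precomputed flat alias->canonical dict and one .get with default.
import Mathlib
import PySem

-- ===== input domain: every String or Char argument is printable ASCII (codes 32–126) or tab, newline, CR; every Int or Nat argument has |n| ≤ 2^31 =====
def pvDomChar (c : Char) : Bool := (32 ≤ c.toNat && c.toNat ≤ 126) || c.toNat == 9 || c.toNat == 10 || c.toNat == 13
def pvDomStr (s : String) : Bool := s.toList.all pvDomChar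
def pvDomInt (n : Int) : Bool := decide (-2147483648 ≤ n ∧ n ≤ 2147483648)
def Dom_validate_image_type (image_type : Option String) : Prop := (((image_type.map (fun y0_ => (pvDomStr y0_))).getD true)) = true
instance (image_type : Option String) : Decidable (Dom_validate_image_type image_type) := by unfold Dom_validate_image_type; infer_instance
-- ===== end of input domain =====

-- B replaces A's loop over the canonical->aliases dict (list membership per entry) with a single
-- precomputed flat alias->canonical dict looked up once with a default (objective: simpler).
-- ===== PORT A =====
-- loop over valid_types.items(): returns the first mime_type whose alias list contains the lowered input
def vitLoop : List (String × List String) → String → String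
  | [], _ => "image/jpeg"
  | (mime_type, aliases) :: rest, low =>
      if low ∈ aliases then mime_type else vitLoop rest low

def validate_image_type (image_type : Option String) : String :=
  let valid_types : PySem.Dict String (List String) :=
    PySem.Dict.ofList
      [("image/jpeg", ["image/jpeg", "jpeg", "jpg"]),
       ("image/png", ["image/png", "png"]),
       ("image/gif", ["image/gif", "gif"]),
       ("image/webp", ["image/webp", "webp"])]
  match image_type with
  | none => "image/jpeg"
  | some s =>
      if s = "" then "image/jpeg"
      else vitLoop valid_types.items (PySem.Str.lower s)

-- ===== PORT B =====
-- flat reverse dict alias -> canonical mime type; one lookup with default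
def vitCanonical : PySem.Dict String String :=
  PySem.Dict.ofList
    [("image/jpeg", "image/jpeg"), ("jpeg", "image/jpeg"), ("jpg", "image/jpeg"),
     ("image/png", "image/png"), ("png", "image/png"),
     ("image/gif", "image/gif"), ("gif", "image/gif"),
     ("image/webp", "image/webp"), ("webp", "image/webp")]

def validate_image_type_alt (image_type : Option String) : String :=
  match image_type with
  | none => "image/jpeg"
  | some s =>
      if s = "" then "image/jpeg"
      else PySem.Dict.getD vitCanonical (PySem.Str.lower s) "image/jpeg"

-- ===== PRECONDITION & SPEC =====
def Spec_validate_image_type (image_type : Option String) (out : String) : Prop := out = validate_image_type_alt image_type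
instance (image_type : Option String) (out : String) : Decidable (Spec_validate_image_type image_type out) := by unfold Spec_validate_image_type; infer_instance

-- ===== CLAIM (what is proved, stated in full; the proofs are below) =====
def Claim_equal_validate_image_type : Prop := ∀ (image_type : Option String), Dom_validate_image_type image_type → Spec_validate_image_type image_type (validate_image_type image_type)

-- ===== LEMMAS AND PROOFS =====

-- ===== VERDICT (by name: the statement is the Claim_ definition above) =====
-- the two finite lookups agree for every lowered string
theorem vit_core (low : String) :
    vitLoop (PySem.Dict.ofList
      [("image/jpeg", ["image/jpeg", "jpeg", "jpg"]),
       ("image/png", ["image/png", "png"]),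
       ("image/gif", ["image/gif", "gif"]),
       ("image/webp", ["image/webp", "webp"])]).items low
    = PySem.Dict.getD vitCanonical low "image/jpeg" := by
  by_cases h1 : low = "image/jpeg"; · subst h1; rfl
  by_cases h2 : low = "jpeg"; · subst h2; rfl
  by_cases h3 : low = "jpg"; · subst h3; rfl
  by_cases h4 : low = "image/png"; · subst h4; rfl
  by_cases h5 : low = "png"; · subst h5; rfl
  by_cases h6 : low = "image/gif"; · subst h6; rfl
  by_cases h7 : low = "gif"; · subst h7; rfl
  by_cases h8 : low = "image/webp"; · subst h8; rfl
  by_cases h9 : low = "webp"; · subst h9; rfl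
  have b1 : ("image/jpeg" == low) = false := by simp [Ne.symm h1]
  have b2 : ("jpeg" == low) = false := by simp [Ne.symm h2]
  have b3 : ("jpg" == low) = false := by simp [Ne.symm h3]
  have b4 : ("image/png" == low) = false := by simp [Ne.symm h4]
  have b5 : ("png" == low) = false := by simp [Ne.symm h5]
  have b6 : ("image/gif" == low) = false := by simp [Ne.symm h6]
  have b7 : ("gif" == low) = false := by simp [Ne.symm h7]
  have b8 : ("image/webp" == low) = false := by simp [Ne.symm h8]
  have b9 : ("webp" == low) = false := by simp [Ne.symm h9]
  simp [vitLoop, vitCanonical, PySem.Dict.ofList, PySem.Dict.getD, PySem.Dict.get?,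
    PySem.Dict.update, PySem.Dict.insert, PySem.Dict.empty, PySem.Dict.contains,
    List.find?, h1, h2, h3, h4, h5, h6, h7, h8, h9, b1, b2, b3, b4, b5, b6, b7, b8, b9]

theorem validate_image_type_spec : Claim_equal_validate_image_type := by
  intro image_type _
  unfold Spec_validate_image_type validate_image_type validate_image_type_alt
  cases image_type with
  | none => rfl
  | some s =>
      simp only
      split_ifs with h
      · rfl
      · exact vit_core (PySem.Str.lower s)
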